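-- pv_equiv track=rewrite | github.com/LU1IN001/S1_TME-TD | Activité-3/ACT3.py | invariant
-- ===== SOURCE A (Python) =====
-- def invariant(i: int, n: int, s: int) -> bool:
--     """
--     Indique si l'invariant de est_parfait est vrai ou faux
--     """
--     somme: int = 0
--     j: int = 1
--     while j <= i - 1:
--         if n%j == 0:
--             somme = somme + j
--         j = j + 1
--     return s == somme
-- ===== SOURCE B (Python) =====
-- def invariant(i: int, n: int, s: int) -> bool:
--     """
--     Indique si l'invariant de est_parfait est vrai ou faux
--     """
--     m = i - 1
--     if n == 0:
--         # every j in 1..m divides 0: closed-form triangular sum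
--         total = m * (m + 1) // 2 if m > 0 else 0
--     else:
--         a = abs(n)
--         total = 0
--         d = 1
--         while d * d <= a:
--             if a % d == 0:
--                 if d <= m:
--                     total += d
--                 e = a // d
--                 if e != d and e <= m:
--                     total += e
--             d += 1
--     return s == total
-- ===== Notes on version B (the rewrite author's own statement) =====
-- stated objective: faster
-- what changed: B enumerates divisor pairs (d, |n|/d) of |n| up to sqrt(|n|) and sums those below i (with a closed-form triangular sum for n == 0), instead of A's trial loop over every j in 1..i-1.
import Mathlib
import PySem

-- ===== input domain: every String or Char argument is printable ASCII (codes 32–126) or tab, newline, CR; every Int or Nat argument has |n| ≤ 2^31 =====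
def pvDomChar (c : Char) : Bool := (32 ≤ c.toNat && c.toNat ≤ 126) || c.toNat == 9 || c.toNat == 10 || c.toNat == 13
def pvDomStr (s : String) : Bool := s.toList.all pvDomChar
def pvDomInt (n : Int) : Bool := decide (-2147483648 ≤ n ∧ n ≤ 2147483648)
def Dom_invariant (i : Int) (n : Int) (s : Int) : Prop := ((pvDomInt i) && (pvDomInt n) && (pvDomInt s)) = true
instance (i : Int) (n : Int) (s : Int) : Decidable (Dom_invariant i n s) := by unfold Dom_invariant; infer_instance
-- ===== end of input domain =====

-- B replaces A's trial loop over every j in 1..i-1 by an enumeration of divisor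
-- pairs (d, |n|/d) of |n| up to sqrt(|n|) (closed-form triangular sum for n = 0).

-- ===== PORT A =====
-- while j <= i - 1: if n % j == 0: somme += j; j += 1
def invariantLoop (i n : Int) (j somme : Int) : Int :=
  if _h : j ≤ i - 1 then
    invariantLoop i n (j + 1) (if PySem.Int.mod n j = 0 then somme + j else somme)
  else somme
termination_by (i - j).toNat
decreasing_by omega

def invariant (i : Int) (n : Int) (s : Int) : Bool :=
  s == invariantLoop i n 1 0

-- ===== PORT B =====
-- while d*d <= a: if a % d == 0: (add d if d<=m; e = a//d; add e if e≠d and e<=m); d += 1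
def invariantAltLoop (a m : Int) (d total : Int) : Int :=
  if _h : d * d ≤ a then
    invariantAltLoop a m (d + 1)
      (if PySem.Int.mod a d = 0 then
        let t := if d ≤ m then total + d else total
        let e := PySem.Int.floordiv a d
        if e ≠ d ∧ e ≤ m then t + e else t
      else total)
  else total
termination_by (a + 1 - d).toNat
decreasing_by
  have hda : d ≤ a := by
    by_cases h1 : 1 ≤ d
    · nlinarith
    · nlinarith [mul_self_nonneg d]
  omega

def invariant_alt (i : Int) (n : Int) (s : Int) : Bool :=
  let m := i - 1
  let total : Int :=
    if n = 0 then (if m > 0 then PySem.Int.floordiv (m * (m + 1)) 2 else 0)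
    else invariantAltLoop |n| m 1 0
  s == total

-- ===== PRECONDITION & SPEC =====
def Spec_invariant (i : Int) (n : Int) (s : Int) (out : Bool) : Prop := out = invariant_alt i n s
instance (i : Int) (n : Int) (s : Int) (out : Bool) : Decidable (Spec_invariant i n s out) := by unfold Spec_invariant; infer_instance

-- ===== CLAIM (what is proved, stated in full; the proofs are below) =====
def Claim_equal_invariant : Prop := ∀ (i : Int) (n : Int) (s : Int), Dom_invariant i n s → Spec_invariant i n s (invariant i n s)

-- ===== LEMMAS AND PROOFS =====

-- A's loop adds every j in [j', i-1] dividing n.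
theorem loopA_sum (t : ℕ) (i n : Int) : ∀ (j' : ℕ), 1 ≤ j' → (i - (j' : Int)).toNat ≤ t → ∀ somme : Int,
    invariantLoop i n (j' : Int) somme
      = somme + ∑ k ∈ Finset.Icc j' (i - 1).toNat,
          (if PySem.Int.mod n (k : Int) = 0 then (k : Int) else 0) := by
  induction t with
  | zero =>
    intro j' hj ht somme
    rw [invariantLoop]
    have h : ¬ ((j' : Int) ≤ i - 1) := by omega
    rw [dif_neg h, Finset.Icc_eq_empty (by omega)]; simp
  | succ t ih =>
    intro j' hj ht somme
    rw [invariantLoop]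
    by_cases h : (j' : Int) ≤ i - 1
    · have h1 : ((j' + 1 : ℕ) : Int) = (j' : Int) + 1 := by push_cast; ring
      rw [dif_pos h, ← h1, ih (j' + 1) (by omega) (by omega)]
      have hins : Finset.Icc j' (i - 1).toNat = insert j' (Finset.Icc (j' + 1) (i - 1).toNat) := by
        ext k; simp only [Finset.mem_Icc, Finset.mem_insert]; omega
      rw [hins, Finset.sum_insert (by simp only [Finset.mem_Icc]; omega)]
      split_ifs <;> ring
    · rw [dif_neg h, Finset.Icc_eq_empty (by omega)]; simp

-- Gauss: twice the triangular sum.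
theorem gauss_sum (m' : ℕ) : (∑ k ∈ Finset.Icc 1 m', (k : Int)) * 2 = (m' : Int) * ((m' : Int) + 1) := by
  induction m' with
  | zero => simp
  | succ t ih =>
    rw [Finset.sum_Icc_succ_top (by omega)]
    push_cast
    push_cast at ih
    linarith

-- Proof-only abbreviations: the divisors of a' that are ≤ m and still to be collected at step d'.
def Sset (a' : ℕ) (m : Int) (t : ℕ) : Finset ℕ :=
  (Finset.Icc 1 a').filter (fun k => k ∣ a' ∧ (k : Int) ≤ m ∧ t ≤ min k (a' / k))

def Eset (a' : ℕ) (m : Int) (d' : ℕ) : Finset ℕ :=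
  (Finset.Icc 1 a').filter (fun k => k ∣ a' ∧ (k : Int) ≤ m ∧ min k (a' / k) = d')

theorem div_pair (a' d' k : ℕ) (ha : 1 ≤ a') (hk : k ∣ a') (h : min k (a' / k) = d') :
    k = d' ∨ (d' ∣ a' ∧ k = a' / d') := by
  rcases min_choice k (a' / k) with hc | hc
  · exact Or.inl (hc.symm.trans h)
  · right
    have hkd : a' / k = d' := hc.symm.trans h
    have hd : d' ∣ a' := hkd ▸ Nat.div_dvd_of_dvd hk
    exact ⟨hd, by rw [← hkd, Nat.div_div_self hk (by omega)]⟩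

theorem Ssplit (a' : ℕ) (m : Int) (d' : ℕ) :
    (∑ k ∈ Sset a' m d', (k : Int))
      = (∑ k ∈ Sset a' m (d' + 1), (k : Int)) + ∑ k ∈ Eset a' m d', (k : Int) := by
  have h := Finset.sum_filter_add_sum_filter_not (Sset a' m d')
    (fun k => d' + 1 ≤ min k (a' / k)) (fun k => (k : Int))
  have h1 : (Sset a' m d').filter (fun k => d' + 1 ≤ min k (a' / k)) = Sset a' m (d' + 1) := by
    unfold Sset
    rw [Finset.filter_filter]
    apply Finset.filter_congr
    intro k _
    constructor
    · rintro ⟨⟨hx1, hx2, _⟩, hx4⟩; exact ⟨hx1, hx2, hx4⟩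
    · rintro ⟨hx1, hx2, hx4⟩; exact ⟨⟨hx1, hx2, by omega⟩, hx4⟩
  have h2 : (Sset a' m d').filter (fun k => ¬ (d' + 1 ≤ min k (a' / k))) = Eset a' m d' := by
    unfold Sset Eset
    rw [Finset.filter_filter]
    apply Finset.filter_congr
    intro k _
    constructor
    · rintro ⟨⟨hx1, hx2, hx3⟩, hx4⟩; exact ⟨hx1, hx2, by omega⟩
    · rintro ⟨hx1, hx2, hx3⟩; exact ⟨⟨hx1, hx2, by omega⟩, by omega⟩
  rw [h1, h2] at h
  linarith [h]

theorem Eset_mem (a' : ℕ) (m : Int) (d' : ℕ) (ha : 1 ≤ a') (hd : 1 ≤ d') (hdd : d' * d' ≤ a')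
    (k : ℕ) :
    k ∈ Eset a' m d'
      ↔ (d' ∣ a' ∧ ((k = d' ∧ (d' : Int) ≤ m) ∨ (k = a' / d' ∧ ((a' / d' : ℕ) : Int) ≤ m))) := by
  have hde : d' ≤ a' / d' := (Nat.le_div_iff_mul_le (by omega)).mpr hdd
  unfold Eset
  simp only [Finset.mem_filter, Finset.mem_Icc]
  constructor
  · rintro ⟨⟨hk1, hk2⟩, hk3, hk4, hk5⟩
    rcases div_pair a' d' k ha hk3 hk5 with rfl | ⟨hdvd, rfl⟩
    · exact ⟨hk3, Or.inl ⟨rfl, hk4⟩⟩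
    · exact ⟨hdvd, Or.inr ⟨rfl, hk4⟩⟩
  · rintro ⟨hdvd, ⟨rfl, hm⟩ | ⟨rfl, hm⟩⟩
    · refine ⟨⟨hd, Nat.le_of_dvd (by omega) hdvd⟩, hdvd, hm, ?_⟩
      exact min_eq_left hde
    · have hea : a' / d' ∣ a' := Nat.div_dvd_of_dvd hdvd
      refine ⟨⟨by omega, Nat.div_le_self _ _⟩, hea, hm, ?_⟩
      rw [Nat.div_div_self hdvd (by omega)]
      exact min_eq_right hde

theorem Esum (a' : ℕ) (m : Int) (d' : ℕ) (ha : 1 ≤ a') (hd : 1 ≤ d') (hdd : d' * d' ≤ a') :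
    (∑ k ∈ Eset a' m d', (k : Int))
      = if a' % d' = 0 then
          ((if (d' : Int) ≤ m then (d' : Int) else 0)
            + (if ((a' / d' : ℕ) : Int) ≠ (d' : Int) ∧ ((a' / d' : ℕ) : Int) ≤ m
                then ((a' / d' : ℕ) : Int) else 0))
        else 0 := by
  by_cases hdvd : d' ∣ a'
  · have hmod : a' % d' = 0 := by rcases hdvd with ⟨c, rfl⟩; simp [Nat.mul_mod_right]
    rw [if_pos hmod]
    have he := Eset_mem a' m d' ha hd hdd
    by_cases h2 : ((a' / d' : ℕ) : Int) ≠ (d' : ℕ) ∧ ((a' / d' : ℕ) : Int) ≤ m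
    · rw [if_pos h2]
      by_cases h1 : (d' : Int) ≤ m
      · rw [if_pos h1]
        have h21 := h2.1
        have hne : d' ≠ a' / d' := by omega
        have hE : Eset a' m d' = {d', a' / d'} := by
          ext k; rw [he k]
          simp only [hdvd, true_and, Finset.mem_insert, Finset.mem_singleton]
          omega
        rw [hE, Finset.sum_pair hne]
      · rw [if_neg h1]
        have hE : Eset a' m d' = {a' / d'} := by
          ext k; rw [he k]
          simp only [hdvd, true_and, Finset.mem_singleton]
          omega
        rw [hE, Finset.sum_singleton]
        ring
    · rw [if_neg h2]
      have h2' : ((a' / d' : ℕ) : Int) = (d' : Int) ∨ ¬ ((a' / d' : ℕ) : Int) ≤ m := by tauto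
      by_cases h1 : (d' : Int) ≤ m
      · rw [if_pos h1]
        have hE : Eset a' m d' = {d'} := by
          ext k; rw [he k]
          simp only [hdvd, true_and, Finset.mem_singleton]
          omega
        rw [hE, Finset.sum_singleton]
        ring
      · rw [if_neg h1]
        have hE : Eset a' m d' = ∅ := by
          ext k; rw [he k]
          simp only [hdvd, true_and, Finset.notMem_empty, iff_false]
          rintro (⟨rfl, hm⟩ | ⟨rfl, hm⟩)
          · exact h1 hm
          · rcases h2' with h2' | h2'
            · exact h1 (h2' ▸ hm)
            · exact h2' hm
        rw [hE]
        simp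
  · have hmod : ¬ a' % d' = 0 := fun h => hdvd (Nat.dvd_of_mod_eq_zero h)
    rw [if_neg hmod]
    have hE : Eset a' m d' = ∅ := by
      rw [Finset.eq_empty_iff_forall_notMem]
      intro k hk
      rw [Eset_mem a' m d' ha hd hdd] at hk
      exact hdvd hk.1
    rw [hE]
    simp

theorem loopB_sum (t : ℕ) (a' : ℕ) (ha : 1 ≤ a') (m : Int) : ∀ (d' : ℕ), 1 ≤ d' → a' + 1 - d' ≤ t → ∀ total : Int,
    invariantAltLoop (a' : Int) m (d' : Int) total = total + ∑ k ∈ Sset a' m d', (k : Int) := by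
  induction t with
  | zero =>
    intro d' hd ht total
    rw [invariantAltLoop]
    have hgt : ¬ ((d' : Int) * (d' : Int) ≤ (a' : Int)) := by
      have h1 : a' < d' := by omega
      have h2 : d' ≤ d' * d' := Nat.le_mul_of_pos_left d' (by omega)
      omega
    rw [dif_neg hgt]
    have hS : Sset a' m d' = ∅ := by
      rw [Finset.eq_empty_iff_forall_notMem]
      intro k hk
      unfold Sset at hk
      simp only [Finset.mem_filter, Finset.mem_Icc] at hk
      have := le_trans hk.2.2.2 (min_le_left _ _)
      omega
    rw [hS]
    simp
  | succ t ih =>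
    intro d' hd ht total
    rw [invariantAltLoop]
    by_cases hdd : (d' : Int) * (d' : Int) ≤ (a' : Int)
    · have hdd' : d' * d' ≤ a' := by exact_mod_cast hdd
      rw [dif_pos hdd]
      have h1 : ((d' + 1 : ℕ) : Int) = (d' : Int) + 1 := by push_cast; ring
      have hlt : d' ≤ a' := le_trans (Nat.le_mul_of_pos_left d' (by omega)) hdd'
      rw [← h1, ih (d' + 1) (by omega) (by omega)]
      rw [Ssplit a' m d']
      have hmodc : PySem.Int.mod (a' : Int) (d' : Int) = ((a' % d' : ℕ) : Int) :=
        PySem.Int.mod_natCast a' d'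
      have hdivc : PySem.Int.floordiv (a' : Int) (d' : Int) = ((a' / d' : ℕ) : Int) :=
        PySem.Int.floordiv_natCast a' d'
      rw [hmodc, hdivc, Esum a' m d' ha hd hdd']
      dsimp only
      by_cases hz : a' % d' = 0
      · rw [if_pos hz]
        have hz' : ((a' % d' : ℕ) : Int) = 0 := by exact_mod_cast hz
        rw [if_pos hz']
        split_ifs <;> push_cast <;> ring
      · rw [if_neg hz]
        have hz' : ¬ ((a' % d' : ℕ) : Int) = 0 := by exact_mod_cast hz
        rw [if_neg hz']
        ring
    · rw [dif_neg hdd]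
      have hdd' : ¬ d' * d' ≤ a' := by exact_mod_cast hdd
      have hS : Sset a' m d' = ∅ := by
        rw [Finset.eq_empty_iff_forall_notMem]
        intro k hk
        unfold Sset at hk
        simp only [Finset.mem_filter, Finset.mem_Icc] at hk
        obtain ⟨⟨hk1, hk2⟩, hk3, _, hk5⟩ := hk
        have hmm : min k (a' / k) * min k (a' / k) ≤ k * (a' / k) :=
          Nat.mul_le_mul (min_le_left _ _) (min_le_right _ _)
        rw [Nat.mul_div_cancel' hk3] at hmm
        exact hdd' (le_trans (Nat.mul_le_mul hk5 hk5) hmm)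
      rw [hS]
      simp

-- ===== VERDICT (by name: the statement is the Claim_ definition above) =====
theorem invariant_spec : Claim_equal_invariant := by
  intro i n s _
  unfold Spec_invariant invariant invariant_alt
  dsimp only
  have hA := loopA_sum ((i - 1).toNat + 1) i n 1 le_rfl (by omega) 0
  simp only [Nat.cast_one, zero_add] at hA
  rw [hA]
  congr 1
  by_cases hn : n = 0
  · subst hn
    rw [if_pos rfl]
    have hmodz : ∀ k ∈ Finset.Icc 1 (i - 1).toNat,
        (if PySem.Int.mod 0 (k : Int) = 0 then (k : Int) else 0) = (k : Int) := by
      intro k _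
      rw [if_pos ((PySem.Int.mod_eq_zero_iff_dvd 0 _).mpr (dvd_zero _))]
    rw [Finset.sum_congr rfl hmodz]
    by_cases hm : i - 1 > 0
    · rw [if_pos hm, PySem.Int.floordiv_eq_ediv_of_pos (by omega : (0:Int) < 2)]
      have hg := gauss_sum (i - 1).toNat
      have hc : (((i - 1).toNat : ℕ) : Int) = i - 1 := by omega
      rw [hc] at hg
      rw [← hg, Int.mul_ediv_cancel _ (by norm_num)]
    · rw [if_neg hm]
      have h0 : (i - 1).toNat = 0 := by omega
      rw [h0]
      simp
  · rw [if_neg hn]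
    have ha : 1 ≤ n.natAbs := Int.natAbs_pos.mpr hn
    have habs : |n| = ((n.natAbs : ℕ) : Int) := Int.abs_eq_natAbs n
    have hB := loopB_sum n.natAbs n.natAbs ha (i - 1) 1 le_rfl (by omega) 0
    simp only [Nat.cast_one, zero_add] at hB
    rw [habs, hB]
    have hL : (∑ k ∈ Finset.Icc 1 (i - 1).toNat,
          (if PySem.Int.mod n (k : Int) = 0 then (k : Int) else 0))
        = ∑ k ∈ (Finset.Icc 1 (i - 1).toNat).filter (fun k => k ∣ n.natAbs), (k : Int) := by
      rw [Finset.sum_filter]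
      apply Finset.sum_congr rfl
      intro k _
      have hiff : (PySem.Int.mod n (k : Int) = 0) ↔ (k ∣ n.natAbs) := by
        rw [PySem.Int.mod_eq_zero_iff_dvd]
        rw [← Int.dvd_natAbs]
        exact Int.natCast_dvd_natCast
      simp only [hiff]
    rw [hL]
    apply Finset.sum_congr ?_ (fun _ _ => rfl)
    ext k
    simp only [Finset.mem_filter, Finset.mem_Icc, Sset]
    constructor
    · rintro ⟨⟨hk1, hk2⟩, hk3⟩
      have hka : k ≤ n.natAbs := Nat.le_of_dvd (by omega) hk3
      have hdk : 1 ≤ n.natAbs / k := (Nat.one_le_div_iff (by omega)).mpr hka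
      exact ⟨⟨hk1, hka⟩, hk3, by omega, le_min hk1 hdk⟩
    · rintro ⟨⟨hk1, hk2⟩, hk3, hk4, hk5⟩
      exact ⟨⟨hk1, by omega⟩, hk3⟩
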